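-- pv_equiv track=rewrite | github.com/mkimuram/k8s-ext-connector | controller/genrule.py | gen_ssh_tunnel_rules
-- ===== SOURCE A (Python) =====
-- MIN_PORT_NUM = 2049
--
-- MAX_PORT_NUM = 65536
--
-- def gen_port(source_ip, target_port, used_ports):
--   for port in range(MIN_PORT_NUM, MAX_PORT_NUM):
--     if port not in used_ports:
--       used_ports[port] = source_ip + ":" + str(target_port)
--       return port
--   return ""
--
-- def gen_ssh_tunnel_rules(target_ip, source_ips, target_ports, used_ports):
--   rules = ""
--   for source_ip in source_ips:
--     for target_port in target_ports:
--       fwd_port = gen_port(source_ip, target_port, used_ports)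
--       # Skip generating rules if any of values are not available
--       if fwd_port == "" or target_ip == "" or target_port == "" or source_ip == "":
--         continue
--       rules += "{}:{}:{},{}\n".format(fwd_port, target_ip, target_port, source_ip)
--   return rules
-- ===== SOURCE B (Python) =====
-- MIN_PORT_NUM = 2049
--
-- MAX_PORT_NUM = 65536
--
-- def gen_ssh_tunnel_rules(target_ip, source_ips, target_ports, used_ports):
--   # Same mutation of used_ports as the original; free ports are handed out by a
--   # monotonically advancing cursor over a prebuilt set of taken ports instead of
--   # rescanning the whole port range for every allocation.
--   taken = set(used_ports)
--   cursor = MIN_PORT_NUM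
--   rules = ""
--   for source_ip in source_ips:
--     for target_port in target_ports:
--       while cursor < MAX_PORT_NUM and cursor in taken:
--         cursor += 1
--       if cursor >= MAX_PORT_NUM:
--         continue
--       fwd_port = cursor
--       used_ports[fwd_port] = source_ip + ":" + str(target_port)
--       cursor += 1
--       if target_ip == "" or target_port == "" or source_ip == "":
--         continue
--       rules += "{}:{}:{},{}\n".format(fwd_port, target_ip, target_port, source_ip)
--   return rules
-- ===== Notes on version B (the rewrite author's own statement) =====
-- stated objective: faster
-- what changed: Replaces the per-call rescan of the whole port range (gen_port starts at MIN_PORT_NUM every time) with a set of taken ports built once plus a monotonic cursor that never moves backwards, allocating each forwarding port in amortized O(1).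
import Mathlib
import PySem

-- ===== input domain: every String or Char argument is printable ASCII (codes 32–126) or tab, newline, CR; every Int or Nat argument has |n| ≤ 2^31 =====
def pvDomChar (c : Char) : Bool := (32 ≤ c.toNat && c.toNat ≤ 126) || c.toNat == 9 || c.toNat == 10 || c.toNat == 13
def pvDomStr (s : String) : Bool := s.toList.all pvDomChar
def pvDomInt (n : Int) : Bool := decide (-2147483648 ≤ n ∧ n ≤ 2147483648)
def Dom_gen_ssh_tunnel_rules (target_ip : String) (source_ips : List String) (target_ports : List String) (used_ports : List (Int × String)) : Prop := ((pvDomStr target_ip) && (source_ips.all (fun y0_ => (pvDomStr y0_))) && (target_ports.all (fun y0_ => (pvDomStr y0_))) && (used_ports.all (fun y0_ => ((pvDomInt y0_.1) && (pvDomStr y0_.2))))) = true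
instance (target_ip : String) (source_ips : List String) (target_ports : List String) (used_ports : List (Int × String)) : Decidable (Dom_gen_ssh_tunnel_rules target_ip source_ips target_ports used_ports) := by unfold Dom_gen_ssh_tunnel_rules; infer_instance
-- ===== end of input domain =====

-- B allocates forwarding ports with a prebuilt taken-set and a monotonic cursor instead of
-- A's rescan of the whole port range per allocation (timed faster); both Pythons mutate
-- used_ports identically — the equivalence proved here is about the RETURN value.

-- ===== PORT A =====
-- gen_port's `for port in range(MIN_PORT_NUM, MAX_PORT_NUM)` loop: returns the allocated
-- port (none = Python's "") together with the updated dict.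
def genPortScanA (src tp : String) (d : PySem.Dict Int String) : List Int → Option Int × PySem.Dict Int String
  | [] => (none, d)
  | p :: rest =>
    if d.contains p then genPortScanA src tp d rest
    else (some p, d.insert p (src ++ ":" ++ tp))

-- the body of A's inner `for target_port in target_ports` loop
def stepA (target_ip source_ip : String) (st : String × PySem.Dict Int String) (target_port : String) : String × PySem.Dict Int String :=
  match genPortScanA source_ip target_port st.2 (PySem.List.pyRange 2049 65536) with
  | (none, d') => (st.1, d')
  | (some fwd, d') =>
    if target_ip == "" || target_port == "" || source_ip == "" then (st.1, d')
    else (st.1 ++ PySem.Int.toStr fwd ++ ":" ++ target_ip ++ ":" ++ target_port ++ "," ++ source_ip ++ "\n", d')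

def gen_ssh_tunnel_rules (target_ip : String) (source_ips : List String) (target_ports : List String) (used_ports : List (Int × String)) : String :=
  (source_ips.foldl
    (fun st source_ip => target_ports.foldl (stepA target_ip source_ip) st)
    ("", PySem.Dict.ofList used_ports)).1

-- ===== PORT B =====
-- `while cursor < MAX_PORT_NUM and cursor in taken: cursor += 1`
def advCursor (S : PySem.Set Int) (c : Int) : Int :=
  if h : c < 65536 ∧ S.contains c then advCursor S (c + 1) else c
termination_by (65536 - c).toNat
decreasing_by omega

-- the body of B's inner `for target_port in target_ports` loop
def stepB (S : PySem.Set Int) (target_ip source_ip : String) (st : String × Int) (target_port : String) : String × Int :=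
  let c' := advCursor S st.2
  if c' < 65536 then
    if target_ip == "" || target_port == "" || source_ip == "" then (st.1, c' + 1)
    else (st.1 ++ PySem.Int.toStr c' ++ ":" ++ target_ip ++ ":" ++ target_port ++ "," ++ source_ip ++ "\n", c' + 1)
  else (st.1, c')

def gen_ssh_tunnel_rules_alt (target_ip : String) (source_ips : List String) (target_ports : List String) (used_ports : List (Int × String)) : String :=
  let S : PySem.Set Int := PySem.Set.ofList (used_ports.map Prod.fst)
  (source_ips.foldl
    (fun st source_ip => target_ports.foldl (stepB S target_ip source_ip) st)
    ("", (2049 : Int))).1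

-- ===== PRECONDITION & SPEC =====
def Spec_gen_ssh_tunnel_rules (target_ip : String) (source_ips : List String) (target_ports : List String) (used_ports : List (Int × String)) (out : String) : Prop := out = gen_ssh_tunnel_rules_alt target_ip source_ips target_ports used_ports
instance (target_ip : String) (source_ips : List String) (target_ports : List String) (used_ports : List (Int × String)) (out : String) : Decidable (Spec_gen_ssh_tunnel_rules target_ip source_ips target_ports used_ports out) := by unfold Spec_gen_ssh_tunnel_rules; infer_instance

-- ===== CLAIM (what is proved, stated in full; the proofs are below) =====
def Claim_equal_gen_ssh_tunnel_rules : Prop := ∀ (target_ip : String) (source_ips : List String) (target_ports : List String) (used_ports : List (Int × String)), Dom_gen_ssh_tunnel_rules target_ip source_ips target_ports used_ports → Spec_gen_ssh_tunnel_rules target_ip source_ips target_ports used_ports (gen_ssh_tunnel_rules target_ip source_ips target_ports used_ports)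

-- ===== LEMMAS AND PROOFS =====

-- A's dict state d and B's cursor state c describe the same taken-port situation:
-- every port below c is taken in d, and from c upwards d's keys are exactly the original keys S.
def InvStates (S : PySem.Set Int) (d : PySem.Dict Int String) (c : Int) : Prop :=
  2049 ≤ c ∧ c ≤ 65536 ∧
  (∀ p : Int, 2049 ≤ p → p < c → d.contains p = true) ∧
  (∀ p : Int, c ≤ p → d.contains p = S.contains p)

theorem advCursor_spec (S : PySem.Set Int) (c : Int) (hc : c ≤ 65536) :
    c ≤ advCursor S c ∧ advCursor S c ≤ 65536 ∧
    (∀ p : Int, c ≤ p → p < advCursor S c → S.contains p = true) ∧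
    (advCursor S c < 65536 → S.contains (advCursor S c) = false) := by
  rw [advCursor]
  split
  · rename_i h
    obtain ⟨ih1, ih2, ih3, ih4⟩ := advCursor_spec S (c + 1) (by omega)
    refine ⟨by omega, ih2, ?_, ih4⟩
    intro p hp1 hp2
    rcases eq_or_lt_of_le hp1 with hp | hp
    · exact hp ▸ h.2
    · exact ih3 p (by omega) hp2
  · rename_i h
    refine ⟨le_rfl, hc, fun p hp1 hp2 => absurd hp1 (by omega), fun hlt => ?_⟩
    rcases Bool.eq_false_or_eq_true (S.contains c) with hS | hS
    · exact absurd ⟨hlt, hS⟩ h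
    · exact hS
termination_by (65536 - c).toNat
decreasing_by omega

-- A's full rescan from 2049 lands exactly on B's advanced cursor.
theorem scan_eq (src tp : String) (S : PySem.Set Int) :
    ∀ (n : Nat) (a c : Int) (d : PySem.Dict Int String), (65536 - a).toNat = n →
      2049 ≤ a → a ≤ c → c ≤ 65536 →
      (∀ p : Int, a ≤ p → p < c → d.contains p = true) →
      (∀ p : Int, c ≤ p → d.contains p = S.contains p) →
      genPortScanA src tp d (PySem.List.pyRange a 65536) =
        (if advCursor S c < 65536 then (some (advCursor S c), d.insert (advCursor S c) (src ++ ":" ++ tp))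
         else (none, d)) := by
  intro n
  induction n with
  | zero =>
    intro a c d hn h1 h2 h3 h4 h5
    have ha : (65536 : Int) ≤ a := by omega
    have hce : advCursor S c = c := by
      rw [advCursor, dif_neg]
      rintro ⟨hlt, -⟩; omega
    rw [PySem.List.pyRange_one_eq_nil ha, hce, if_neg (by omega)]
    simp [genPortScanA]
  | succ n ih =>
    intro a c d hn h1 h2 h3 h4 h5
    have halt : a < 65536 := by omega
    rw [PySem.List.pyRange_one_cons halt]
    by_cases hac : a < c
    · have hda : d.contains a = true := h4 a le_rfl hac
      simp only [genPortScanA, hda, if_true]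
      exact ih (a + 1) c d (by omega) (by omega) (by omega) h3
        (fun p hp1 hp2 => h4 p (by omega) hp2) h5
    · have haeq : a = c := by omega
      subst haeq
      rcases Bool.eq_false_or_eq_true (S.contains a) with hS | hS
      · have hda : d.contains a = true := by rw [h5 a le_rfl, hS]
        simp only [genPortScanA, hda, if_true]
        have hadv : advCursor S a = advCursor S (a + 1) := by
          rw [advCursor, dif_pos ⟨halt, hS⟩]
        rw [hadv]
        exact ih (a + 1) (a + 1) d (by omega) (by omega) le_rfl (by omega)
          (fun p hp1 hp2 => absurd hp1 (by omega))
          (fun p hp => h5 p (by omega))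
      · have hda : d.contains a = false := by rw [h5 a le_rfl, hS]
        simp only [genPortScanA, hda, Bool.false_eq_true, if_false]
        have hadv : advCursor S a = a := by
          rw [advCursor, dif_neg]
          rintro ⟨-, hS'⟩; rw [hS] at hS'; exact absurd hS' (by simp)
        rw [hadv, if_pos halt]

-- one inner-loop step preserves the relation and produces the same rules
theorem step_rel (S : PySem.Set Int) (tip sip tp r : String) (d : PySem.Dict Int String) (c : Int)
    (h : InvStates S d c) :
    (stepA tip sip (r, d) tp).1 = (stepB S tip sip (r, c) tp).1 ∧
      InvStates S (stepA tip sip (r, d) tp).2 (stepB S tip sip (r, c) tp).2 := by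
  obtain ⟨h1, h2, h3, h4⟩ := h
  have hscan := scan_eq sip tp S ((65536 - 2049 : Int)).toNat 2049 c d rfl le_rfl h1 h2
    (fun p hp1 hp2 => h3 p hp1 hp2) h4
  obtain ⟨a1, a2, a3, a4⟩ := advCursor_spec S c h2
  by_cases hcl : advCursor S c < 65536
  · have hA : stepA tip sip (r, d) tp =
        (if tip == "" || tp == "" || sip == "" then (r, d.insert (advCursor S c) (sip ++ ":" ++ tp))
         else (r ++ PySem.Int.toStr (advCursor S c) ++ ":" ++ tip ++ ":" ++ tp ++ "," ++ sip ++ "\n",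
               d.insert (advCursor S c) (sip ++ ":" ++ tp))) := by
      simp only [stepA, hscan, if_pos hcl]
    have hB : stepB S tip sip (r, c) tp =
        (if tip == "" || tp == "" || sip == "" then (r, advCursor S c + 1)
         else (r ++ PySem.Int.toStr (advCursor S c) ++ ":" ++ tip ++ ":" ++ tp ++ "," ++ sip ++ "\n",
               advCursor S c + 1)) := by
      simp only [stepB, if_pos hcl]
    have hinv : InvStates S (d.insert (advCursor S c) (sip ++ ":" ++ tp)) (advCursor S c + 1) := by
      refine ⟨by omega, by omega, ?_, ?_⟩
      · intro p hp1 hp2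
        rw [PySem.Dict.contains_insert]
        by_cases hpe : p = advCursor S c
        · simp [hpe]
        · have hplt : p < advCursor S c := by omega
          by_cases hpc : p < c
          · simp [h3 p hp1 hpc]
          · have := h4 p (by omega)
            rw [this, a3 p (by omega) hplt]
            simp
      · intro p hp
        rw [PySem.Dict.contains_insert]
        have hpe : (p == advCursor S c) = false := by simp; omega
        rw [hpe, Bool.false_or]
        exact h4 p (by omega)
    rw [hA, hB]
    split <;> exact ⟨rfl, hinv⟩
  · have hce : advCursor S c = 65536 := by omega
    have hA : stepA tip sip (r, d) tp = (r, d) := by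
      simp only [stepA, hscan, if_neg hcl]
    have hB : stepB S tip sip (r, c) tp = (r, advCursor S c) := by
      simp only [stepB, if_neg hcl]
    rw [hA, hB]
    refine ⟨rfl, by omega, by omega, ?_, ?_⟩
    · intro p hp1 hp2
      by_cases hpc : p < c
      · exact h3 p hp1 hpc
      · rw [h4 p (by omega)]
        exact a3 p (by omega) hp2
    · intro p hp
      exact h4 p (by omega)

-- the inner fold over target_ports preserves the relation
theorem inner_rel (S : PySem.Set Int) (tip sip : String) (tps : List String) :
    ∀ (r : String) (d : PySem.Dict Int String) (c : Int), InvStates S d c →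
      (tps.foldl (stepA tip sip) (r, d)).1 = (tps.foldl (stepB S tip sip) (r, c)).1 ∧
        InvStates S (tps.foldl (stepA tip sip) (r, d)).2 (tps.foldl (stepB S tip sip) (r, c)).2 := by
  induction tps with
  | nil => intro r d c h; exact ⟨rfl, h⟩
  | cons tp tps ih =>
    intro r d c h
    obtain ⟨heq, hinv⟩ := step_rel S tip sip tp r d c h
    simp only [List.foldl_cons]
    have hA : stepA tip sip (r, d) tp = ((stepA tip sip (r, d) tp).1, (stepA tip sip (r, d) tp).2) := Prod.mk.eta.symm
    have hB : stepB S tip sip (r, c) tp = ((stepB S tip sip (r, c) tp).1, (stepB S tip sip (r, c) tp).2) := Prod.mk.eta.symm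
    rw [hA, hB, ← heq]
    exact ih (stepA tip sip (r, d) tp).1 (stepA tip sip (r, d) tp).2 (stepB S tip sip (r, c) tp).2 hinv

-- the outer fold over source_ips preserves the relation
theorem outer_rel (S : PySem.Set Int) (tip : String) (tps : List String) (sips : List String) :
    ∀ (r : String) (d : PySem.Dict Int String) (c : Int), InvStates S d c →
      (sips.foldl (fun st sip => tps.foldl (stepA tip sip) st) (r, d)).1 =
        (sips.foldl (fun st sip => tps.foldl (stepB S tip sip) st) (r, c)).1 := by
  induction sips with
  | nil => intro r d c _; rfl
  | cons sip sips ih =>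
    intro r d c h
    obtain ⟨heq, hinv⟩ := inner_rel S tip sip tps r d c h
    simp only [List.foldl_cons]
    have hA : tps.foldl (stepA tip sip) (r, d) =
        ((tps.foldl (stepA tip sip) (r, d)).1, (tps.foldl (stepA tip sip) (r, d)).2) := Prod.mk.eta.symm
    have hB : tps.foldl (stepB S tip sip) (r, c) =
        ((tps.foldl (stepB S tip sip) (r, c)).1, (tps.foldl (stepB S tip sip) (r, c)).2) := Prod.mk.eta.symm
    rw [hA, hB, ← heq]
    exact ih (tps.foldl (stepA tip sip) (r, d)).1 (tps.foldl (stepA tip sip) (r, d)).2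
      (tps.foldl (stepB S tip sip) (r, c)).2 hinv

-- the initial states are related: ofList's keys are exactly the key set of the pairs
theorem init_inv (l : List (Int × String)) :
    InvStates (PySem.Set.ofList (l.map Prod.fst)) (PySem.Dict.ofList l) 2049 := by
  refine ⟨le_rfl, by omega, fun p hp1 hp2 => absurd hp1 (by omega), fun p _ => ?_⟩
  rw [Bool.eq_iff_iff, PySem.Dict.contains_iff_mem_keys, PySem.Set.contains_iff]
  have hk : (PySem.Dict.ofList l).keys = PySem.Set.ofList (l.map Prod.fst) := by
    show (PySem.Dict.empty.update l).keys = _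
    unfold PySem.Dict.update
    rw [PySem.Dict.keys_foldl_insert_key l Prod.fst (fun _ p => p.2) PySem.Dict.empty,
      PySem.Dict.keys_empty, PySem.Set.update_nil_left]
  rw [hk]

-- ===== VERDICT (by name: the statement is the Claim_ definition above) =====
theorem gen_ssh_tunnel_rules_spec : Claim_equal_gen_ssh_tunnel_rules := by
  intro target_ip source_ips target_ports used_ports _
  show gen_ssh_tunnel_rules target_ip source_ips target_ports used_ports =
    gen_ssh_tunnel_rules_alt target_ip source_ips target_ports used_ports
  unfold gen_ssh_tunnel_rules gen_ssh_tunnel_rules_alt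
  exact outer_rel _ target_ip target_ports source_ips "" _ 2049 (init_inv used_ports)
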